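-- pv_equiv track=rewrite | github.com/tetras92/SchemasDeductifsEnAMCD | CHAPITRE5/Fichier_principal_Execution.py | check_int_List_1
-- ===== SOURCE A (Python) =====
-- m = 9  # a lancer
--
-- def check_int_List_1(int_List):
--     A_binary_encoding_list = [integer_to_bin(val_int) for val_int in int_List]
--     """significativite des m criteres"""
--     for i in range(m):
--         if all([alt[i] == '0' for alt in A_binary_encoding_list]) or all(
--                 [alt[i] == '1' for alt in A_binary_encoding_list]):
--             return False
--
--     return True
--
-- def integer_to_bin(val_int):
--     return format(val_int, "b").zfill(m)
-- ===== SOURCE B (Python) =====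
-- m = 9  # a lancer
--
-- def check_int_List_1(int_List):
--     # One pass over the data: maintain the set of characters seen in each of
--     # the m columns, then check no column is constantly '0' or constantly '1'.
--     if not int_List:
--         return False
--     seen = [set() for _ in range(m)]
--     for val_int in int_List:
--         e = format(val_int, "b").zfill(m)
--         seen = [s | {c} for s, c in zip(seen, e)]
--     return all(s != {'0'} and s != {'1'} for s in seen)
-- ===== Notes on version B (the rewrite author's own statement) =====
-- stated objective: alternative
-- what changed: A loops over the 9 bit positions and for each builds and rescans two full comprehension lists over all encodings; B makes one pass over the data maintaining a per-column set of seen characters and then checks each column's set.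
import Mathlib
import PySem

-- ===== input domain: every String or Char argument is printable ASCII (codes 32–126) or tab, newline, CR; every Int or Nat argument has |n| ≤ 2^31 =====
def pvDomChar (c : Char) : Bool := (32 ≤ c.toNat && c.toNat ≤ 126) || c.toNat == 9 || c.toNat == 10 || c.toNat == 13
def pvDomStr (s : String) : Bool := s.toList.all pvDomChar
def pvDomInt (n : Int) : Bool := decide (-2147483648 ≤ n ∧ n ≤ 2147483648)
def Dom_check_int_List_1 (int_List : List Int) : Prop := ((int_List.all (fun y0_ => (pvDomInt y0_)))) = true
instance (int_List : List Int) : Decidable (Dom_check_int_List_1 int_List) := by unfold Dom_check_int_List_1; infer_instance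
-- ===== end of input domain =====

-- B replaces A's per-position double rescans of all encodings by a single pass over the
-- data maintaining per-column sets of seen characters (objective: alternative).


-- ===== PORT A =====
-- integer_to_bin(val_int) = format(val_int, "b").zfill(9)
def integer_to_bin (val_int : Int) : List Char :=
  PySem.Chars.zfill (PySem.Int.toBinChars val_int) 9

-- the 'for i in range(m)' loop with its early 'return False'.
-- alt[i] is ported as pyGet?; it never returns none here since zfill guarantees
-- length ≥ 9 and i ∈ [0, 8].
def aLoop (encs : List (List Char)) : List Int → Bool
  | [] => true
  | i :: rest =>
      if ((encs.map (fun alt => PySem.List.pyGet? alt i == some '0')).all id ||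
          (encs.map (fun alt => PySem.List.pyGet? alt i == some '1')).all id) then
        false
      else
        aLoop encs rest

def check_int_List_1 (int_List : List Int) : Bool :=
  let A_binary_encoding_list := int_List.map integer_to_bin
  aLoop A_binary_encoding_list (PySem.List.pyRange 0 9 1)

-- ===== PORT B =====
-- format(val_int, "b").zfill(9) on B's side
def bEncode (val_int : Int) : List Char :=
  PySem.Chars.zfill (PySem.Int.toBinChars val_int) 9

-- seen = [s | {c} for s, c in zip(seen, e)]
def bStep (seen : List (PySem.Set Char)) (val_int : Int) : List (PySem.Set Char) :=
  List.zipWith (fun s c => PySem.Set.add s c) seen (bEncode val_int)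

-- s != {'0'} and s != {'1'}
def bColOK (s : PySem.Set Char) : Bool :=
  !(PySem.Set.equal s (PySem.Set.ofList ['0']) || PySem.Set.equal s (PySem.Set.ofList ['1']))

def check_int_List_1_alt (int_List : List Int) : Bool :=
  if int_List.isEmpty then false
  else (int_List.foldl bStep (List.replicate 9 PySem.Set.empty)).all bColOK

-- ===== PRECONDITION & SPEC =====
def Spec_check_int_List_1 (int_List : List Int) (out : Bool) : Prop := out = check_int_List_1_alt int_List
instance (int_List : List Int) (out : Bool) : Decidable (Spec_check_int_List_1 int_List out) := by unfold Spec_check_int_List_1; infer_instance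

-- ===== CLAIM (what is proved, stated in full; the proofs are below) =====
def Claim_equal_check_int_List_1 : Prop := ∀ (int_List : List Int), Dom_check_int_List_1 int_List → Spec_check_int_List_1 int_List (check_int_List_1 int_List)

-- ===== LEMMAS AND PROOFS =====

theorem lenEnc (v : Int) : 9 ≤ (bEncode v).length := by
  simp [bEncode, PySem.Chars.length_zfill]

theorem all_congr_mem {α : Type} (l : List α) (p q : α → Bool)
    (h : ∀ x ∈ l, p x = q x) : l.all p = l.all q := by
  induction l with
  | nil => rfl
  | cons x xs ih =>
      rw [List.all_cons, List.all_cons, h x (by simp),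
        ih (fun y hy => h y (by simp [hy]))]

theorem aLoop_all (encs : List (List Char)) (l : List Int) :
    aLoop encs l = l.all (fun i =>
      !((encs.map (fun alt => PySem.List.pyGet? alt i == some '0')).all id ||
        (encs.map (fun alt => PySem.List.pyGet? alt i == some '1')).all id)) := by
  induction l with
  | nil => rfl
  | cons i rest ih =>
      rw [List.all_cons, ← ih]
      by_cases h : ((encs.map (fun alt => PySem.List.pyGet? alt i == some '0')).all id ||
          (encs.map (fun alt => PySem.List.pyGet? alt i == some '1')).all id) = true
      · rw [aLoop, if_pos h, h, Bool.not_true, Bool.false_and]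
      · rw [aLoop, if_neg h, Bool.eq_false_iff.mpr h, Bool.not_false, Bool.true_and]

theorem zipWith_map_range (g : Nat → PySem.Set Char) (e : List Char) (he : 9 ≤ e.length) :
    List.zipWith (fun s c => PySem.Set.add s c) ((List.range 9).map g) e
      = (List.range 9).map (fun i => PySem.Set.add (g i) (e.getD i ' ')) := by
  apply List.ext_getElem
  · simp; omega
  · intro i h1 h2
    have hi : i < 9 := by simpa using h2
    have hie : i < e.length := lt_of_lt_of_le hi he
    simp [List.getElem_zipWith, List.getD_eq_getElem?_getD, List.getElem?_eq_getElem hie]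

theorem fold_cols (vs : List Int) (g : Nat → PySem.Set Char) :
    vs.foldl bStep ((List.range 9).map g)
      = (List.range 9).map (fun i =>
          vs.foldl (fun s v => PySem.Set.add s ((bEncode v).getD i ' ')) (g i)) := by
  induction vs generalizing g with
  | nil => rfl
  | cons v vs ih =>
      simp only [List.foldl_cons]
      have h1 : bStep ((List.range 9).map g) v
          = (List.range 9).map (fun i => PySem.Set.add (g i) ((bEncode v).getD i ' ')) :=
        zipWith_map_range g (bEncode v) (lenEnc v)
      rw [h1, ih]

theorem col_all_eq (vs : List Int) (hv : vs ≠ []) (i : Nat) (d : Char) :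
    PySem.Set.equal
      (vs.foldl (fun s v => PySem.Set.add s ((bEncode v).getD i ' ')) PySem.Set.empty)
      (PySem.Set.ofList [d])
    = vs.all (fun v => (bEncode v).getD i ' ' == d) := by
  rw [Bool.eq_iff_iff, PySem.Set.equal_iff]
  simp only [PySem.Set.mem_foldl_add, PySem.Set.mem_ofList, List.mem_singleton,
    List.all_eq_true, beq_iff_eq]
  have hempty : ∀ x : Char, x ∈ (PySem.Set.empty : PySem.Set Char) ↔ False := by
    intro x; simp [PySem.Set.empty]
  constructor
  · intro h v hvmem
    exact (h ((bEncode v).getD i ' ')).mp (Or.inr ⟨v, hvmem, rfl⟩)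
  · intro h x
    constructor
    · rintro (hx | ⟨v, hvmem, rfl⟩)
      · exact absurd hx (by simp [PySem.Set.empty])
      · exact h v hvmem
    · intro hx
      obtain ⟨v, hvmem⟩ := List.exists_mem_of_ne_nil vs hv
      exact Or.inr ⟨v, hvmem, by rw [hx, h v hvmem]⟩

theorem pyGet_enc (v : Int) (i : Nat) (hi : i < 9) :
    PySem.List.pyGet? (integer_to_bin v) (i : Int) = some ((bEncode v).getD i ' ') := by
  have hl : i < (bEncode v).length := lt_of_lt_of_le hi (lenEnc v)
  show PySem.List.pyGet? (bEncode v) (i : Int) = some ((bEncode v).getD i ' ')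
  simp [PySem.List.pyGet?_natCast, List.getD_eq_getElem?_getD, List.getElem?_eq_getElem hl]

theorem side_all_eq (vs : List Int) (i : Nat) (hi : i < 9) (d : Char) :
    ((vs.map integer_to_bin).map (fun alt => PySem.List.pyGet? alt (i : Int) == some d)).all id
      = vs.all (fun v => (bEncode v).getD i ' ' == d) := by
  rw [List.map_map, List.all_map]
  apply all_congr_mem
  intro v _
  simp [Function.comp, pyGet_enc v i hi]

theorem pointwise (vs : List Int) (hv : vs ≠ []) (i : Nat) (hi : i < 9) :
    (!(((vs.map integer_to_bin).map (fun alt => PySem.List.pyGet? alt (i : Int) == some '0')).all id ||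
       ((vs.map integer_to_bin).map (fun alt => PySem.List.pyGet? alt (i : Int) == some '1')).all id))
    = bColOK (vs.foldl (fun s v => PySem.Set.add s ((bEncode v).getD i ' ')) PySem.Set.empty) := by
  rw [side_all_eq vs i hi '0', side_all_eq vs i hi '1']
  unfold bColOK
  rw [col_all_eq vs hv i '0', col_all_eq vs hv i '1']

theorem main_eq (l : List Int) : check_int_List_1 l = check_int_List_1_alt l := by
  cases l with
  | nil => decide
  | cons x xs =>
      have hv : (x :: xs : List Int) ≠ [] := by simp
      have hrange : PySem.List.pyRange 0 9 1 = (List.range 9).map (fun (n : Nat) => (n : Int)) := by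
        decide
      have hrep : (List.replicate 9 (PySem.Set.empty : PySem.Set Char))
          = (List.range 9).map (fun _ => PySem.Set.empty) := by decide
      unfold check_int_List_1 check_int_List_1_alt
      simp only [List.isEmpty_cons, Bool.false_eq_true, if_false]
      rw [aLoop_all, hrange, hrep, fold_cols, List.all_map, List.all_map]
      apply all_congr_mem
      intro i hi
      exact pointwise (x :: xs) hv i (List.mem_range.mp hi)

-- ===== VERDICT (by name: the statement is the Claim_ definition above) =====
theorem check_int_List_1_spec : Claim_equal_check_int_List_1 := by
  intro l _
  unfold Spec_check_int_List_1
  exact main_eq l
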